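-- pv_equiv track=rewrite | github.com/981377660LMT/algorithm-study | 6_tree/树的性质/树的欧拉路径/最小表示法-括号树-树的欧拉路径/minLexEulerTour.py | minLexEulerTour01
-- ===== SOURCE A (Python) =====
-- from collections import deque
-- from typing import Deque, List
--
-- def minLexEulerTour01(tree: List[List[int]]) -> List[int]:
--     """返回树的长为2*n的01欧拉序列,其中n为节点数.
--     0表示进入子树,1表示返回父节点.
--     """
--
--     def dfs(cur: int, pre: int) -> Deque[int]:
--         sub = sorted([dfs(next, cur) for next in tree[cur] if next != pre])
--         res = deque()
--         for d in sub:
--             if len(res) > len(d):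
--                 while d:
--                     res.append(d.popleft())
--             else:
--                 res, d = d, res
--                 while d:
--                     res.appendleft(d.pop())
--         res.appendleft(0)
--         res.append(1)
--         return res
--
--     res = dfs(0, -1)
--     return list(res)
-- ===== SOURCE B (Python) =====
-- from typing import List
--
-- def minLexEulerTour01(tree: List[List[int]]) -> List[int]:
--     """返回树的长为2*n的01欧拉序列,其中n为节点数.
--     0表示进入子树,1表示返回父节点.
--     """
--
--     def dfs(cur: int, pre: int) -> List[int]:
--         out = [0]
--         for sub in sorted(dfs(next, cur) for next in tree[cur] if next != pre):
--             out += sub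
--         out.append(1)
--         return out
--
--     return dfs(0, -1)
-- ===== Notes on version B (the rewrite author's own statement) =====
-- stated objective: simpler
-- what changed: B drops the deque-based small-to-large merge loop entirely: each node just concatenates its sorted child subtour lists into one plain list ([0] + joined children + [1]); Pre_ admits exactly the inputs on which A's parent-excluding DFS terminates (outside it A raises IndexError or RecursionError).
import Mathlib
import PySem

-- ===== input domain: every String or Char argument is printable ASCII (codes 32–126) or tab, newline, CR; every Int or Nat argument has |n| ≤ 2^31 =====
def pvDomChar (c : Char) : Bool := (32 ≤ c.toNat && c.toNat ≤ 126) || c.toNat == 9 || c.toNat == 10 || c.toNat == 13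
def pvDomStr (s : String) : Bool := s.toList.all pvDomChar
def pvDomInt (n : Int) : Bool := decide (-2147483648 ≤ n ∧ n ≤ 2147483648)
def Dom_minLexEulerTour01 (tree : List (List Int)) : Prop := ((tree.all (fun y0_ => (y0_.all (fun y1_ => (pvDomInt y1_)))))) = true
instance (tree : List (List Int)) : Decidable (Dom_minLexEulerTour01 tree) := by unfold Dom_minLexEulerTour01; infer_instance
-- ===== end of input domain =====

-- B replaces A's deque small-to-large merge loop by plain concatenation of the sorted child
-- subtours into one list (objective: simpler); equal return value on every input admitted by Pre_.

-- ===== PORT A =====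
-- recursion fuel: the parent-excluding DFS touches at most 2*(#edge entries)+1 distinct
-- (parent, node) states (each node index may also appear as its negative alias), so this
-- fuel is never exhausted on inputs satisfying Pre_ below (both ports use the same fuel)
def pvFuel (tree : List (List Int)) : Nat := 2 * tree.flatten.length + 3

-- `while d: res.append(d.popleft())`
def pvA_drainFront (res d : List Int) : List Int :=
  match d with
  | [] => res
  | x :: rest => pvA_drainFront (res ++ [x]) rest

-- `while d: res.appendleft(d.pop())`
def pvA_drainBack (res d : List Int) : List Int :=
  if h : d = [] then res
  else pvA_drainBack (d.getLast h :: res) d.dropLast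
termination_by d.length
decreasing_by have := List.length_pos_of_ne_nil h; simp [List.length_dropLast]; omega

def pvA_dfs (tree : List (List Int)) : Nat → Int → Int → List Int
  | 0, _, _ => []
  | fuel + 1, cur, pre =>
    let sub := PySem.List.sorted
      (((PySem.List.pyGetD tree cur []).filter (fun next => next != pre)).map
        (fun next => pvA_dfs tree fuel next cur)) (fun x => x) false
    let res := sub.foldl
      (fun res d => if res.length > d.length then pvA_drainFront res d else pvA_drainBack d res)
      ([] : List Int)
    0 :: (res ++ [1])

def minLexEulerTour01 (tree : List (List Int)) : List Int :=
  pvA_dfs tree (pvFuel tree) 0 (-1)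

-- ===== PORT B =====
def pvB_dfs (tree : List (List Int)) : Nat → Int → Int → List Int
  | 0, _, _ => []
  | fuel + 1, cur, pre =>
    let subs := PySem.List.sorted
      (((PySem.List.pyGetD tree cur []).filter (fun next => next != pre)).map
        (fun next => pvB_dfs tree fuel next cur)) (fun x => x) false
    (subs.foldl (fun out sub => out ++ sub) [0]) ++ [1]

def minLexEulerTour01_alt (tree : List (List Int)) : List Int :=
  pvB_dfs tree (pvFuel tree) 0 (-1)

-- ===== PRECONDITION & SPEC =====
def pvValidIdx (n : Nat) (i : Int) : Bool := decide (-(n : Int) ≤ i ∧ i < (n : Int))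

-- the (parent, node) successor states of one DFS state, exactly A's child filter
def pvStep (tree : List (List Int)) (s : Int × Int) : List (Int × Int) :=
  ((PySem.List.pyGetD tree s.2 []).filter (fun x => x != s.1)).map (fun x => (s.2, x))

-- the distinct DFS states first reached after exactly k steps from the root state (-1, 0)
def pvFrontier (tree : List (List Int)) : Nat → List (Int × Int)
  | 0 => [((-1 : Int), (0 : Int))]
  | k + 1 => PySem.List.dedup ((pvFrontier tree k).flatMap (pvStep tree))

-- Pre_ holds exactly when A's parent-excluding DFS from node 0 returns: every reachable node
-- index is a valid Python index of `tree`, and the walk frontier dies out (no reachable cycle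
-- of states); outside Pre_ the Python A raises IndexError or RecursionError.
def Pre_minLexEulerTour01 (tree : List (List Int)) : Prop :=
  tree ≠ [] ∧
  (∀ k < pvFuel tree, ∀ s ∈ pvFrontier tree k, pvValidIdx tree.length s.2 = true) ∧
  pvFrontier tree (pvFuel tree) = []

instance (tree : List (List Int)) : Decidable (Pre_minLexEulerTour01 tree) := by
  unfold Pre_minLexEulerTour01; infer_instance

def pvWitness_minLexEulerTour01 : List (List Int) := [[1, 2], [0], [0]]

def Spec_minLexEulerTour01 (tree : List (List Int)) (out : List Int) : Prop := out = minLexEulerTour01_alt tree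
instance (tree : List (List Int)) (out : List Int) : Decidable (Spec_minLexEulerTour01 tree out) := by unfold Spec_minLexEulerTour01; infer_instance

-- ===== CLAIM (what is proved, stated in full; the proofs are below) =====
def Claim_equal_minLexEulerTour01 : Prop := ∀ (tree : List (List Int)), Dom_minLexEulerTour01 tree → Pre_minLexEulerTour01 tree → Spec_minLexEulerTour01 tree (minLexEulerTour01 tree)

-- ===== LEMMAS AND PROOFS =====
lemma pvA_drainFront_eq (d res : List Int) : pvA_drainFront res d = res ++ d := by
  induction d generalizing res with
  | nil => simp [pvA_drainFront]
  | cons x rest ih => simp [pvA_drainFront, ih]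

lemma pvA_drainBack_eq (d res : List Int) : pvA_drainBack res d = d ++ res := by
  induction d using List.reverseRecOn generalizing res with
  | nil => rw [pvA_drainBack.eq_def]; simp
  | append_singleton xs x ih =>
    rw [pvA_drainBack.eq_def]
    simp [ih]

lemma pvMerge_foldl_eq (L : List (List Int)) (init : List Int) :
    L.foldl
      (fun res d => if res.length > d.length then pvA_drainFront res d else pvA_drainBack d res)
      init = L.foldl (fun r d => r ++ d) init := by
  induction L generalizing init with
  | nil => rfl
  | cons x xs ih => simp [List.foldl_cons, pvA_drainFront_eq, pvA_drainBack_eq]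

lemma pvFoldl_append_init (L : List (List Int)) (a b : List Int) :
    L.foldl (fun r d => r ++ d) (a ++ b) = a ++ L.foldl (fun r d => r ++ d) b := by
  induction L generalizing b with
  | nil => simp
  | cons x xs ih => simp [List.foldl_cons, List.append_assoc, ih]

lemma pvDfs_eq (tree : List (List Int)) :
    ∀ fuel cur pre, pvA_dfs tree fuel cur pre = pvB_dfs tree fuel cur pre := by
  intro fuel
  induction fuel with
  | zero => intro cur pre; rfl
  | succ f ih =>
    intro cur pre
    simp only [pvA_dfs, pvB_dfs]
    have hmap : (fun next => pvA_dfs tree f next cur) = (fun next => pvB_dfs tree f next cur) :=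
      funext (fun n => ih n cur)
    rw [hmap, pvMerge_foldl_eq]
    have h := pvFoldl_append_init
      (PySem.List.sorted
        (((PySem.List.pyGetD tree cur []).filter (fun next => next != pre)).map
          (fun next => pvB_dfs tree f next cur)) (fun x => x) false) [0] []
    simp only [List.append_nil] at h
    rw [h]
    simp

-- ===== VERDICT (by name: the statement is the Claim_ definition above) =====
theorem minLexEulerTour01_spec : Claim_equal_minLexEulerTour01 := by
  intro tree _ _
  unfold Spec_minLexEulerTour01 minLexEulerTour01 minLexEulerTour01_alt
  exact pvDfs_eq tree _ _ _
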